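-- pv_equiv track=rewrite | github.com/KaiGensitz/review-pipeline | pipeline/core/pipeline.py | _match_row_value
-- ===== SOURCE A (Python) =====
-- def _match_row_value(row: dict, key: str) -> str:
--     """Find a value in a row using exact, case-insensitive, or compact keys."""
--
--     if key in row and row[key]:
--         return str(row[key])
--
--     lower = key.lower()
--     for rk, rv in row.items():
--         if rv and rk.lower() == lower:
--             return str(rv)
--
--     compact = key.replace(" ", "").lower()
--     for rk, rv in row.items():
--         if rv and rk.replace(" ", "").lower() == compact:
--             return str(rv)
--     return ""
-- ===== SOURCE B (Python) =====
-- def _match_row_value(row: dict, key: str) -> str: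
--     """One pass over row.items(): keep the first exact, case-insensitive and
--     compact match in three candidate slots; resolve priority after the loop."""
--     lower = key.lower()
--     compact = key.replace(" ", "").lower()
--     exact = ci = comp = None
--     for rk, rv in row.items():
--         if not rv:
--             continue
--         if exact is None and rk == key:
--             exact = rv
--         if ci is None and rk.lower() == lower:
--             ci = rv
--         if comp is None and rk.replace(" ", "").lower() == compact:
--             comp = rv
--     for cand in (exact, ci, comp):
--         if cand is not None:
--             return str(cand)
--     return ""
-- ===== Notes on version B (the rewrite author's own statement) =====
-- stated objective: alternative
-- what changed: Replaces A's three sequential scans (dict lookup, case-insensitive pass, compact pass) with a single pass that records the first match of each kind in three candidate slots and resolves priority after the loop.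
import Mathlib
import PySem

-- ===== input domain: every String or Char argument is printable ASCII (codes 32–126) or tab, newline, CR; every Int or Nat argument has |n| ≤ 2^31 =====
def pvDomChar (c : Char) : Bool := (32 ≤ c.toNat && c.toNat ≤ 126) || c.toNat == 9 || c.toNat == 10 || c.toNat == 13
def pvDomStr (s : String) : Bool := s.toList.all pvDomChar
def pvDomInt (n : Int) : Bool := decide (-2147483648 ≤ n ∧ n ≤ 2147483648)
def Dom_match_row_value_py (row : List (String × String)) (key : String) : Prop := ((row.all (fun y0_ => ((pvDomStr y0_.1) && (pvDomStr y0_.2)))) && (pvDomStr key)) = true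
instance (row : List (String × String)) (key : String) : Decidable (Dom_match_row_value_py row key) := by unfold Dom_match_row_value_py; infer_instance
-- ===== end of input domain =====

-- B collapses A's three sequential passes into one loop with three candidate slots; equivalence of the RETURN value on duplicate-free rows (= every Python dict).

-- ===== PORT A =====
-- dict lookup 'key in row and row[key]': first match in the assoc list (a Python dict has unique keys)
def pvDictGet : List (String × String) → String → Option String
  | [], _ => none
  | (rk, rv) :: t, k => if rk == k then some rv else pvDictGet t k

-- A's 'for rk, rv in row.items(): if rv and p(rk): return str(rv)' loop shape
def pvScan (p : String → Bool) : List (String × String) → Option String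
  | [] => none
  | (rk, rv) :: t => if rv ≠ "" && p rk then some rv else pvScan p t

def match_row_value_py (row : List (String × String)) (key : String) : String :=
  match pvDictGet row key with
  | some v =>
    if v ≠ "" then v
    else
      match pvScan (fun rk => PySem.Str.lower rk == PySem.Str.lower key) row with
      | some rv => rv
      | none =>
        match pvScan (fun rk => PySem.Str.lower (PySem.Str.replace rk " " "") == PySem.Str.lower (PySem.Str.replace key " " "")) row with
        | some rv => rv
        | none => ""
  | none =>
    match pvScan (fun rk => PySem.Str.lower rk == PySem.Str.lower key) row with
    | some rv => rv
    | none =>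
      match pvScan (fun rk => PySem.Str.lower (PySem.Str.replace rk " " "") == PySem.Str.lower (PySem.Str.replace key " " "")) row with
      | some rv => rv
      | none => ""

-- ===== PORT B =====
def pvStep (key lower compact : String)
    (s : Option String × Option String × Option String) (p : String × String) :
    Option String × Option String × Option String :=
  if p.2 == "" then s
  else
    (if s.1.isNone && (p.1 == key) then some p.2 else s.1,
     if s.2.1.isNone && (PySem.Str.lower p.1 == lower) then some p.2 else s.2.1,
     if s.2.2.isNone && (PySem.Str.lower (PySem.Str.replace p.1 " " "") == compact) then some p.2 else s.2.2)

def match_row_value_py_alt (row : List (String × String)) (key : String) : String :=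
  let lower := PySem.Str.lower key
  let compact := PySem.Str.lower (PySem.Str.replace key " " "")
  let st := row.foldl (pvStep key lower compact) (none, none, none)
  ((st.1.orElse fun _ => (st.2.1.orElse fun _ => st.2.2))).getD ""

-- ===== PRECONDITION & SPEC =====
-- Pre_ excludes rows with duplicate keys: the argument is a Python dict, which cannot hold them,
-- so an association list with a repeated key does not correspond to any input of A.
def Pre_match_row_value_py (row : List (String × String)) (key : String) : Prop :=
  (row.map (·.1)).Nodup
instance (row : List (String × String)) (key : String) : Decidable (Pre_match_row_value_py row key) := by unfold Pre_match_row_value_py; infer_instance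

def pvWitness_match_row_value_py : (List (String × String)) × String :=
  ([("Name", "x"), ("a b", "y")], "A B")

def Spec_match_row_value_py (row : List (String × String)) (key : String) (out : String) : Prop := out = match_row_value_py_alt row key
instance (row : List (String × String)) (key : String) (out : String) : Decidable (Spec_match_row_value_py row key out) := by unfold Spec_match_row_value_py; infer_instance

-- ===== CLAIM (what is proved, stated in full; the proofs are below) =====
def Claim_equal_match_row_value_py : Prop := ∀ (row : List (String × String)) (key : String), Dom_match_row_value_py row key → Pre_match_row_value_py row key → Spec_match_row_value_py row key (match_row_value_py row key)

-- ===== LEMMAS AND PROOFS =====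

-- the one-pass fold computes the three first-match scans
theorem pvStep_foldl (key lower compact : String) (row : List (String × String))
    (e c m : Option String) :
    row.foldl (pvStep key lower compact) (e, c, m) =
      (e.orElse fun _ => pvScan (fun rk => rk == key) row,
       c.orElse fun _ => pvScan (fun rk => PySem.Str.lower rk == lower) row,
       m.orElse fun _ => pvScan (fun rk => PySem.Str.lower (PySem.Str.replace rk " " "") == compact) row) := by
  induction row generalizing e c m with
  | nil => simp [pvScan]
  | cons hd t ih =>
    obtain ⟨rk, rv⟩ := hd
    by_cases hv : rv = ""
    · simp [List.foldl, pvStep, pvScan, hv, ih]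
    · simp only [List.foldl, pvStep, hv]
      rw [ih]
      simp only [pvScan, hv]
      refine Prod.ext ?_ (Prod.ext ?_ ?_) <;>
      · cases e <;> cases c <;> cases m <;>
          simp [Option.orElse] <;> split <;> simp_all [Option.orElse]

-- if the key is absent from the tail keys, the exact scan finds nothing
theorem pvScan_exact_none (key : String) (t : List (String × String))
    (h : key ∉ t.map (·.1)) : pvScan (fun rk => rk == key) t = none := by
  induction t with
  | nil => rfl
  | cons hd t ih =>
    obtain ⟨rk, rv⟩ := hd
    simp only [List.map, List.mem_cons] at h
    push_neg at h
    simp [pvScan, Ne.symm h.1, ih h.2]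

-- on duplicate-free rows the exact scan agrees with the truthy dict lookup
theorem pvScan_exact_eq (key : String) (row : List (String × String))
    (h : (row.map (·.1)).Nodup) :
    pvScan (fun rk => rk == key) row =
      match pvDictGet row key with
      | some v => if v ≠ "" then some v else none
      | none => none := by
  induction row with
  | nil => rfl
  | cons hd t ih =>
    obtain ⟨rk, rv⟩ := hd
    simp only [List.map, List.nodup_cons] at h
    by_cases hk : rk = key
    · subst hk
      by_cases hv : rv = "" <;>
        simp [pvScan, pvDictGet, hv, pvScan_exact_none rk t h.1]
    · simp [pvScan, pvDictGet, hk, ih h.2]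

-- ===== VERDICT (by name: the statement is the Claim_ definition above) =====
theorem match_row_value_py_spec : Claim_equal_match_row_value_py := by
  intro row key _ hpre
  unfold Spec_match_row_value_py match_row_value_py
  simp only [match_row_value_py_alt]
  rw [pvStep_foldl, pvScan_exact_eq key row hpre]
  cases hg : pvDictGet row key with
  | none => simp; cases pvScan (fun rk => PySem.Str.lower rk == PySem.Str.lower key) row <;> simp [Option.orElse] <;> cases pvScan (fun rk => PySem.Str.lower (PySem.Str.replace rk " " "") == PySem.Str.lower (PySem.Str.replace key " " "")) row <;> simp [Option.orElse]
  | some v =>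
    by_cases hv : v = "" <;> simp [hv] <;>
      cases pvScan (fun rk => PySem.Str.lower rk == PySem.Str.lower key) row <;> simp [Option.orElse] <;> cases pvScan (fun rk => PySem.Str.lower (PySem.Str.replace rk " " "") == PySem.Str.lower (PySem.Str.replace key " " "")) row <;> simp [Option.orElse]
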